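-- pv_equiv track=rewrite | github.com/Linhengyang/aiml | Code/Utils/Text/BytePairEncoding.py | segment_word_BPE_greedy
-- ===== SOURCE A (Python) =====
-- import typing as t
--
-- def segment_word_BPE_greedy(
--         word:str,
--         symbols: t.Dict|None,
--         UNK_token:str = "<unk>",
--         EOW_token:str = ''
--         ):
--     '''
--     input:
--         word: 输入单词, 用以拆分成多个 subword. 末尾可以已经添加 EOW_token. 也可以没有添加 EOW_token, 此时会被添加到末尾
--         symbols: 以 EOW_token 作为 end-of-word token, 且以标准BPE流程制作的词元集.
--             如果不输入 symbols, 或输入空 symbols, 那么意味着 word以 整个不分割 的方式返回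
--         UNK_token: unknown token, 用以替代 无法分割的片段
--         EOW_token: end-of-word token, 用以标识 word 的结尾.
--             当输入时, 如果word没有EOW_token, 那么attach在word后面; 分割的结果中, EOW_token将以合适的方式出现, 例如如下:
--                 分割成功:       tok1, ... tokn
--                 分割不成功:     tok1, ... tokn, UNK_token, EOW_token
--             当不输入时, 无视 EOW_token
--                 分割成功:       tok1, ... tokn
--                 分割不成功:     tok1, ... tokn, UNK_token
--     return:
--         segmented: list of string
--             word被切分成 symbols 中包含的 subwords/tokens, 和 UNK_token(如果未能在symbols中找到). 以列表的方式返回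
--         unsegmented: string
--             word中未被 symbols 切分的部分。若成功切分, 则它为 空字符串
--     explain:
--         用贪心的方法来切割输入 word, 即用 symbols 中尽量少的 symbol 来切分 word(将 word 切割成尽量长的subwords/tokens)
--         以 EOW_token 作为 end-of-word token, 且以标准BPE流程制作的词元集 symbols, EOW_token 必然以整体参与形成 token
--         那么在 greedy 的算法下, 即使EOW_token 以部分参与来分割word的过程会出现, 但这种情况不会出现在最终分割结果中
--     '''
--
--     if len(symbols) == 0: # 如果 symbols 为空, 直接将 整个word作为分割好的token返回.
--         return [word], ''
--
--     # start 是起始为止, end 是终结位置后一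
--     # 从start 位置开始
--     #   从 end 为止开始, 检查 start 到 end 是不是 symbols 中的 symbol
--     #       如果不是, end 指针 往前 移 一位, 重新判断
--     #       如果是, 记录该 symbol, 同时 start 移动到 end(即终结位置后一), end 回到末尾后一
--     # 重复这个过程直到 start 等于 end
--     #   start 等于 end 有两种可能:
--     #       可能1: end = length 被赋值给 start. 此时即start 和 end 都处于末尾后一 位置。这意味着 word 被切割完毕
--     #       可能2: end -= 1 过程中等于 start. 此时说明 word 从start位置开始, 往右的每一个字符组合都不是symbols中的symbol,
--     #       说明 word的start位置的字符 不存在于 symbols 中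
--
--     if EOW_token and not word.endswith(EOW_token): # 如果输入了 EOW_token 且 word 不是以 EOW_token 结尾
--         word += EOW_token
--
--     length = len(word)
--     start, end, segmented = 0, length, []
--     while start < end:
--         fragment = word[start:end]
--         if fragment in symbols:
--             segmented.append( fragment )
--             start = end
--             end = length
--         else:
--             end -= 1
--
--     # 循环结束时 start = end. 此时有两种可能
--     #   start = end = length, 此时 word 被切割完毕
--     #   start = end < length, 此时 word 存在 不可被识别片段: 从 start位置开始
--     if start < length:
--         if EOW_token:
--             segmented = segmented + [UNK_token, EOW_token]
--         else:
--             segmented.append( UNK_token )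
--
--
--     return segmented, word[start:]
-- ===== SOURCE B (Python) =====
-- def segment_word_BPE_greedy(
--         word,
--         symbols,
--         UNK_token="<unk>",
--         EOW_token=''
--         ):
--     # Greedy longest-match segmentation via a bounded forward scan:
--     # from each start we only probe fragments up to the longest symbol length,
--     # instead of shrinking a fragment down from the end of the word.
--     if len(symbols) == 0:
--         return [word], ''
--     keys = set(symbols)
--     maxlen = 0
--     for k in keys:
--         maxlen = max(maxlen, len(k))
--     if EOW_token and not word.endswith(EOW_token):
--         word += EOW_token
--     n = len(word)
--     start, segmented = 0, []
--     while start < n: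
--         limit = min(n, start + maxlen)
--         best = None
--         end = start + 1
--         while end <= limit:
--             if word[start:end] in keys:
--                 best = end
--             end += 1
--         if best is None:
--             break
--         segmented.append(word[start:best])
--         start = best
--     if start < n:
--         if EOW_token:
--             segmented = segmented + [UNK_token, EOW_token]
--         else:
--             segmented.append(UNK_token)
--     return segmented, word[start:]
-- ===== Notes on version B (the rewrite author's own statement) =====
-- stated objective: faster
-- what changed: Instead of shrinking a candidate fragment down from the end of the whole word at every position, B precomputes the maximum symbol length once and does a bounded forward scan of at most maxlen fragment lengths from each start, keeping the last (= longest) match.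
import Mathlib
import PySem

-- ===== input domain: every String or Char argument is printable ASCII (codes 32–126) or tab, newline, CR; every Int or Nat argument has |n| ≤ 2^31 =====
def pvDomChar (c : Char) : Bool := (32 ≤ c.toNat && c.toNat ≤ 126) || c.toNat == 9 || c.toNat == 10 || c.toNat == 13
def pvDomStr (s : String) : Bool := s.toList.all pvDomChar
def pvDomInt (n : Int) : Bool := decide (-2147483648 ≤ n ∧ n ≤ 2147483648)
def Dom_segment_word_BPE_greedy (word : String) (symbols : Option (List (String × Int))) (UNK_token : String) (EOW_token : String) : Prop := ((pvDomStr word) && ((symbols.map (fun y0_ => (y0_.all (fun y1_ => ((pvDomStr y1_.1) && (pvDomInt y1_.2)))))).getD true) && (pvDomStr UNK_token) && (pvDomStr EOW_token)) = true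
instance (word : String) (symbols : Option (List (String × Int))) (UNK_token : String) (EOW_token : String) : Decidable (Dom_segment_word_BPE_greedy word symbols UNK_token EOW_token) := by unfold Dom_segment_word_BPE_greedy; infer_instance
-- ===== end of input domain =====

-- B replaces A's backward-shrinking fragment search (restarting from the word's end at every
-- position) by a forward scan bounded by the precomputed maximum symbol length (objective: faster).

-- ===== PORT A =====
-- A's while loop: start/end pointers, fragment = word[start:end]; on a dict-key hit append the
-- fragment, start := end, end := length; otherwise end -= 1.  (word is handled as List Char;
-- dict-key membership 'fragment in symbols' is membership of the fragment among the keys.)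
def pvLoopA (keys : List (List Char)) (w : List Char) (n : Nat) (start e : Nat) (hE : e ≤ n)
    (seg : List String) : List String × Nat :=
  if h : start < e then
    if keys.contains ((w.drop start).take (e - start)) then
      pvLoopA keys w n e n (Nat.le_refl n) (seg ++ [String.ofList ((w.drop start).take (e - start))])
    else
      pvLoopA keys w n start (e - 1) (Nat.le_trans (Nat.sub_le e 1) hE) seg
  else (seg, start)
termination_by (n - start, e)
decreasing_by
  · exact Prod.Lex.left _ _ (by omega)
  · exact Prod.Lex.right _ (by omega)

def segment_word_BPE_greedy (word : String) (symbols : Option (List (String × Int))) (UNK_token : String) (EOW_token : String) : List String × String :=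
  match symbols with
  | none => ([], "")  -- Python raises TypeError here (len(None)); excluded by Pre_
  | some syms =>
    if syms.length = 0 then ([word], "")
    else
      -- if EOW_token and not word.endswith(EOW_token): word += EOW_token
      let w : List Char :=
        if !EOW_token.toList.isEmpty && !(PySem.Chars.endswith word.toList EOW_token.toList)
        then word.toList ++ EOW_token.toList else word.toList
      let n := w.length
      let p := pvLoopA (syms.map (fun kv => kv.1.toList)) w n 0 n (Nat.le_refl n) []
      let seg :=
        if p.2 < n then
          if !EOW_token.toList.isEmpty then p.1 ++ [UNK_token, EOW_token] else p.1 ++ [UNK_token]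
        else p.1
      (seg, String.ofList (w.drop p.2))

-- ===== PORT B =====
-- B's inner while loop: end runs from start+1 up to limit, remembering the last matching end
-- (the remembered end carries the invariant start < end, which B's outer loop needs to advance).
def pvScanB (keys : PySem.Set (List Char)) (w : List Char) (start e limit : Nat)
    (he : start < e) (best : Option {b : Nat // start < b}) : Option {b : Nat // start < b} :=
  if e ≤ limit then
    pvScanB keys w start (e + 1) limit (Nat.lt_succ_of_lt he)
      (if PySem.Set.contains keys ((w.drop start).take (e - start)) then some ⟨e, he⟩ else best)
  else best
termination_by limit + 1 - e

-- B's outer while loop: from each start, scan forward up to maxlen characters and jump to the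
-- longest match; stop if none.
def pvLoopB (keys : PySem.Set (List Char)) (w : List Char) (n maxlen : Nat) (start : Nat)
    (seg : List String) : List String × Nat :=
  if h : start < n then
    match pvScanB keys w start (start + 1) (min n (start + maxlen)) (Nat.lt_succ_self start) none with
    | none => (seg, start)
    | some b => pvLoopB keys w n maxlen b.1 (seg ++ [String.ofList ((w.drop start).take (b.1 - start))])
  else (seg, start)
termination_by n - start
decreasing_by exact Nat.sub_lt_sub_left h b.2

def segment_word_BPE_greedy_alt (word : String) (symbols : Option (List (String × Int))) (UNK_token : String) (EOW_token : String) : List String × String :=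
  match symbols with
  | none => ([], "")  -- Python raises TypeError here (len(None)); excluded by Pre_
  | some syms =>
    if syms.length = 0 then ([word], "")
    else
      let keys := PySem.Set.ofList (syms.map (fun kv => kv.1.toList))
      let maxlen := keys.foldl (fun m k => max m k.length) 0
      let w : List Char :=
        if !EOW_token.toList.isEmpty && !(PySem.Chars.endswith word.toList EOW_token.toList)
        then word.toList ++ EOW_token.toList else word.toList
      let n := w.length
      let p := pvLoopB keys w n maxlen 0 []
      let seg :=
        if p.2 < n then
          if !EOW_token.toList.isEmpty then p.1 ++ [UNK_token, EOW_token] else p.1 ++ [UNK_token]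
        else p.1
      (seg, String.ofList (w.drop p.2))

-- ===== PRECONDITION & SPEC =====
-- Pre_ excludes only symbols = None, on which Python's len(symbols) raises TypeError (in A and in B).
def Pre_segment_word_BPE_greedy (word : String) (symbols : Option (List (String × Int))) (UNK_token : String) (EOW_token : String) : Prop := symbols.isSome = true
instance (word : String) (symbols : Option (List (String × Int))) (UNK_token : String) (EOW_token : String) : Decidable (Pre_segment_word_BPE_greedy word symbols UNK_token EOW_token) := by unfold Pre_segment_word_BPE_greedy; infer_instance

def pvWitness_segment_word_BPE_greedy : String × (Option (List (String × Int))) × String × String :=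
  ("lowest", some [("low", 0), ("est", 1), ("l", 2), ("o", 3)], "<unk>", "")

def Spec_segment_word_BPE_greedy (word : String) (symbols : Option (List (String × Int))) (UNK_token : String) (EOW_token : String) (out : List String × String) : Prop := out = segment_word_BPE_greedy_alt word symbols UNK_token EOW_token
instance (word : String) (symbols : Option (List (String × Int))) (UNK_token : String) (EOW_token : String) (out : List String × String) : Decidable (Spec_segment_word_BPE_greedy word symbols UNK_token EOW_token out) := by unfold Spec_segment_word_BPE_greedy; infer_instance

-- ===== CLAIM (what is proved, stated in full; the proofs are below) =====
def Claim_equal_segment_word_BPE_greedy : Prop := ∀ (word : String) (symbols : Option (List (String × Int))) (UNK_token : String) (EOW_token : String), Dom_segment_word_BPE_greedy word symbols UNK_token EOW_token → Pre_segment_word_BPE_greedy word symbols UNK_token EOW_token → Spec_segment_word_BPE_greedy word symbols UNK_token EOW_token (segment_word_BPE_greedy word symbols UNK_token EOW_token)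

-- ===== LEMMAS AND PROOFS =====

-- the greatest b with lo < b ≤ hi whose fragment predicate holds (descending-first-match)
def pvBestD (P : Nat → Bool) (lo hi : Nat) : Option Nat :=
  if h : lo < hi then (if P hi then some hi else pvBestD P lo (hi - 1)) else none
termination_by hi
decreasing_by omega

theorem pvBestD_split (P : Nat → Bool) : ∀ hi mid lo, lo ≤ mid → mid ≤ hi →
    pvBestD P lo hi = (pvBestD P mid hi).orElse (fun _ => pvBestD P lo mid) := by
  intro hi
  induction hi using Nat.strong_induction_on with
  | _ hi ih =>
    intro mid lo hlm hmh
    by_cases hmid : mid = hi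
    · subst hmid
      conv_rhs => rw [pvBestD]
      rw [dif_neg (by omega), Option.orElse_none]
    · have hlt : mid < hi := by omega
      conv_lhs => rw [pvBestD]
      conv_rhs => rw [pvBestD]
      rw [dif_pos (by omega), dif_pos hlt]
      by_cases hp : P hi = true
      · rw [if_pos hp, if_pos hp, Option.orElse_some]
      · rw [if_neg hp, if_neg hp]
        exact ih (hi - 1) (by omega) mid lo hlm (by omega)

theorem pvBestD_shrink (P : Nat → Bool) : ∀ hi hi' lo, lo ≤ hi' → hi' ≤ hi →
    (∀ b, hi' < b → b ≤ hi → P b = false) → pvBestD P lo hi = pvBestD P lo hi' := by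
  intro hi
  induction hi using Nat.strong_induction_on with
  | _ hi ih =>
    intro hi' lo hl hh hfalse
    by_cases heq : hi' = hi
    · subst heq; rfl
    · have hlt : hi' < hi := by omega
      conv_lhs => rw [pvBestD]
      rw [dif_pos (by omega), if_neg (by simp [hfalse hi hlt (Nat.le_refl hi)])]
      exact ih (hi - 1) (by omega) hi' lo hl (by omega) (fun b h1 h2 => hfalse b h1 (by omega))

-- A's descending inner search, characterised by pvBestD
theorem pvLoopA_eq_bestD (keys : List (List Char)) (w : List Char) (n : Nat) :
    ∀ e (hE : e ≤ n) start seg,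
      pvLoopA keys w n start e hE seg =
        match pvBestD (fun b => keys.contains ((w.drop start).take (b - start))) start e with
        | some b => pvLoopA keys w n b n (Nat.le_refl n)
            (seg ++ [String.ofList ((w.drop start).take (b - start))])
        | none => (seg, start) := by
  intro e
  induction e using Nat.strong_induction_on with
  | _ e ih =>
    intro hE start seg
    rw [pvLoopA, pvBestD]
    by_cases h : start < e
    · rw [dif_pos h, dif_pos h]
      by_cases hp : keys.contains ((w.drop start).take (e - start)) = true
      · rw [if_pos hp, if_pos hp]
      · rw [if_neg hp, if_neg hp]
        exact ih (e - 1) (by omega) (Nat.le_trans (Nat.sub_le e 1) hE) start seg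
    · rw [dif_neg h, dif_neg h]

-- B's ascending scan, characterised by pvBestD
theorem pvScanB_eq_bestD (keys : PySem.Set (List Char)) (w : List Char) (start : Nat) :
    ∀ k e limit (he : start < e) (best : Option {b : Nat // start < b}),
      limit + 1 - e = k →
      (pvScanB keys w start e limit he best).map Subtype.val =
        (pvBestD (fun b => PySem.Set.contains keys ((w.drop start).take (b - start)))
            (e - 1) limit).orElse (fun _ => best.map Subtype.val) := by
  intro k
  induction k with
  | zero =>
    intro e limit he best hk
    rw [pvScanB, if_neg (by omega), pvBestD, dif_neg (by omega), Option.orElse_none]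
  | succ m ih =>
    intro e limit he best hk
    by_cases hle : e ≤ limit
    · rw [pvScanB, if_pos hle, ih (e + 1) limit (Nat.lt_succ_of_lt he) _ (by omega)]
      rw [pvBestD_split _ limit e (e - 1) (by omega) hle]
      have hstep : pvBestD (fun b => PySem.Set.contains keys ((w.drop start).take (b - start)))
          (e - 1) e = (if PySem.Set.contains keys ((w.drop start).take (e - start)) then some e
            else none) := by
        rw [pvBestD, dif_pos (by omega)]
        by_cases hp : PySem.Set.contains keys ((w.drop start).take (e - start)) = true
        · rw [if_pos hp, if_pos hp]
        · rw [if_neg hp, if_neg hp, pvBestD, dif_neg (by omega)]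
      rw [hstep]
      simp only [Nat.add_sub_cancel]
      cases hBD : pvBestD (fun b => PySem.Set.contains keys ((w.drop start).take (b - start)))
          e limit with
      | none =>
        simp only [Option.orElse_none]
        by_cases hp : PySem.Set.contains keys ((w.drop start).take (e - start)) = true
        · rw [if_pos hp, if_pos hp, Option.map_some, Option.orElse_some]
        · rw [if_neg hp, if_neg hp, Option.orElse_none]
      | some b => simp only [Option.orElse_some]
    · rw [pvScanB, if_neg hle, pvBestD, dif_neg (by omega), Option.orElse_none]

theorem pv_le_foldl_max_init : ∀ (l : List (List Char)) (m : Nat),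
    m ≤ l.foldl (fun m k => max m k.length) m := by
  intro l
  induction l with
  | nil => intro m; exact Nat.le_refl m
  | cons x xs ih =>
    intro m
    exact Nat.le_trans (Nat.le_max_left m x.length) (ih (max m x.length))

theorem pv_len_le_foldl_max (k : List Char) :
    ∀ (l : List (List Char)) (m : Nat), k ∈ l → k.length ≤ l.foldl (fun m k => max m k.length) m := by
  intro l
  induction l with
  | nil => intro m h; cases h
  | cons x xs ih =>
    intro m h
    rcases List.mem_cons.mp h with h | h
    · subst h
      exact Nat.le_trans (Nat.le_max_right m k.length) (pv_le_foldl_max_init xs (max m k.length))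
    · exact ih _ h

-- fragments longer than every symbol never match
theorem pv_long_frag_false (keysA : List (List Char)) (w : List Char) (start b : Nat)
    (hb : b ≤ w.length)
    (hlong : (PySem.Set.ofList keysA).foldl (fun m k => max m k.length) 0 < b - start) :
    (PySem.Set.ofList keysA).contains ((w.drop start).take (b - start)) = false := by
  by_contra hc
  rw [Bool.not_eq_false] at hc
  have hmem := (PySem.Set.contains_iff _ _).mp hc
  have hlen := pv_len_le_foldl_max _ _ 0 hmem
  have hfraglen : ((w.drop start).take (b - start)).length = min (b - start) (w.length - start) := by
    simp [List.length_take, List.length_drop]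
  omega

theorem pv_contains_ofList (keysA : List (List Char)) (x : List Char) :
    (PySem.Set.ofList keysA).contains x = keysA.contains x := by
  rw [Bool.eq_iff_iff]
  simp only [PySem.Set.contains_eq_listContains, List.contains_iff_mem]
  exact PySem.Set.mem_ofList keysA x

theorem pvBestD_congr (P Q : Nat → Bool) (h : ∀ b, P b = Q b) : ∀ hi lo, pvBestD P lo hi = pvBestD Q lo hi := by
  intro hi
  induction hi using Nat.strong_induction_on with
  | _ hi ih =>
    intro lo
    conv_lhs => rw [pvBestD]
    conv_rhs => rw [pvBestD]
    by_cases hlt : lo < hi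
    · rw [dif_pos hlt, dif_pos hlt, h hi]
      by_cases hq : Q hi = true
      · rw [if_pos hq, if_pos hq]
      · rw [if_neg hq, if_neg hq, ih (hi - 1) (by omega)]
    · rw [dif_neg hlt, dif_neg hlt]

-- the two outer loops agree
theorem pvLoop_eq (keysA : List (List Char)) (w : List Char) :
    ∀ kfuel start seg, w.length - start = kfuel →
      pvLoopA keysA w w.length start w.length (Nat.le_refl _) seg =
        pvLoopB (PySem.Set.ofList keysA) w w.length
          ((PySem.Set.ofList keysA).foldl (fun m k => max m k.length) 0) start seg := by
  intro kfuel
  induction kfuel using Nat.strong_induction_on with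
  | _ kfuel ih =>
    intro start seg hk
    set keysB := PySem.Set.ofList keysA with hkeysB
    set maxlen := keysB.foldl (fun m k => max m k.length) 0 with hmaxlen
    set n := w.length with hn
    rw [pvLoopB]
    by_cases h : start < n
    · rw [dif_pos h]
      rw [pvLoopA_eq_bestD]
      have hcap : pvBestD (fun b => keysA.contains ((w.drop start).take (b - start))) start n =
          pvBestD (fun b => PySem.Set.contains keysB ((w.drop start).take (b - start))) start
            (min n (start + maxlen)) := by
        rw [pvBestD_congr _ (fun b => PySem.Set.contains keysB ((w.drop start).take (b - start)))
          (fun b => (pv_contains_ofList keysA _).symm) n start]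
        exact pvBestD_shrink _ n (min n (start + maxlen)) start (by omega) (by omega)
          (fun b h1 h2 => pv_long_frag_false keysA w start b h2 (by rw [← hkeysB, ← hmaxlen]; omega))
      have horelse : ∀ (x : Option Nat), x.orElse (fun _ => none) = x := by
        intro x; cases x <;> rfl
      have hscan := pvScanB_eq_bestD keysB w start _ (start + 1) (min n (start + maxlen))
        (Nat.lt_succ_self start) none rfl
      simp only [Nat.add_sub_cancel, Option.map_none, horelse] at hscan
      rw [hcap, ← hscan]
      cases hsc : pvScanB keysB w start (start + 1) (min n (start + maxlen))
          (Nat.lt_succ_self start) none with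
      | none => rw [Option.map_none]
      | some b =>
        rw [Option.map_some]
        exact ih (n - b.1) (by have := b.2; omega) b.1 _ rfl
    · rw [dif_neg h, pvLoopA, dif_neg h]

-- ===== VERDICT (by name: the statement is the Claim_ definition above) =====
theorem segment_word_BPE_greedy_spec : Claim_equal_segment_word_BPE_greedy := by
  intro word symbols UNK_token EOW_token _ hpre
  unfold Spec_segment_word_BPE_greedy
  match symbols with
  | none => cases hpre
  | some syms =>
    unfold segment_word_BPE_greedy segment_word_BPE_greedy_alt
    dsimp only
    by_cases hlen : syms.length = 0
    · rw [if_pos hlen, if_pos hlen]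
    · rw [if_neg hlen, if_neg hlen]
      rw [pvLoop_eq (syms.map (fun kv => kv.1.toList)) _ _ 0 [] rfl]
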